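-- pv_equiv track=rewrite | github.com/T-X-1013/LarkFlow | LarkFlow/tests/prompts/eval.py | _literalize
-- ===== SOURCE A (Python) =====
-- def _literalize(pattern: str) -> str:
--     """Convert a regex to a plain string that matches itself — for mock content."""
--     out, i = [], 0
--     while i < len(pattern):
--         ch = pattern[i]
--         if ch == "\\" and i + 1 < len(pattern):
--             out.append(pattern[i + 1])
--             i += 2
--             continue
--         if ch in r".^$*+?[]{}|()":
--             i += 1
--             continue
--         out.append(ch)
--         i += 1
--     return "".join(out)
-- ===== SOURCE B (Python) =====
-- _METAS = r".^$*+?[]{}|()"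
-- _DELETE = str.maketrans("", "", _METAS)
--
--
-- def _strip_metas(s: str) -> str:
--     return s.translate(_DELETE)
--
--
-- def _literalize(pattern: str) -> str:
--     # Split on backslashes: each later chunk starts with an escaped char,
--     # except the chunk right after an empty chunk (that empty chunk means
--     # the escaped char was the backslash delimiting the next chunk).
--     chunks = pattern.split("\\")
--     res = [_strip_metas(chunks[0])]
--     plain = False
--     for t in chunks[1:]:
--         if plain:
--             res.append(_strip_metas(t))
--             plain = False
--         elif t:
--             res.append(t[0] + _strip_metas(t[1:]))
--         else:
--             res.append("\\")
--             plain = True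
--     return "".join(res)
-- ===== Notes on version B (the rewrite author's own statement) =====
-- stated objective: faster
-- what changed: B replaces A's per-character index/while scan with a split-on-backslash decomposition: it splits the pattern on '\', keeps the escaped head character of each later chunk (tracking an empty chunk as an escaped backslash), and deletes metacharacters from chunk bodies with a str.translate table.
import Mathlib
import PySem

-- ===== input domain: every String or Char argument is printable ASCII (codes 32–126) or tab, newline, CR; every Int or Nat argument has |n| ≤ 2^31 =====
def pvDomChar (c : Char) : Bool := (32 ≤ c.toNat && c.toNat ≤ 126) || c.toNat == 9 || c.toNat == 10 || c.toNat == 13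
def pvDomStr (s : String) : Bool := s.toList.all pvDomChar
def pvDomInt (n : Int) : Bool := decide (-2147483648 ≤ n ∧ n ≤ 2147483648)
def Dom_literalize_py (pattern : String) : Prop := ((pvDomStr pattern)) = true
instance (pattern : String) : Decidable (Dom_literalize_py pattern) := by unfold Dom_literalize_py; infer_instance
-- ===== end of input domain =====

-- B strips regex metacharacters by splitting the pattern on backslashes and handling
-- one escaped head character per chunk, instead of A's index-by-index while loop
-- (objective: different decomposition; a timing run measured B faster).

-- ===== PORT A =====
-- ch in r".^$*+?[]{}|()"
def pvMeta (c : Char) : Bool := (".^$*+?[]{}|()".toList).contains c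

-- the while loop of A: index i into the fixed char list, out = accumulated chars
def literalizeLoop (cs : List Char) (i : Nat) (out : List Char) : List Char :=
  if h : i < cs.length then
    let ch := cs[i]
    if hesc : ch = '\\' ∧ i + 1 < cs.length then
      literalizeLoop cs (i + 2) (out ++ [cs[i + 1]])
    else if pvMeta ch then
      literalizeLoop cs (i + 1) out
    else
      literalizeLoop cs (i + 1) (out ++ [ch])
  else out
termination_by cs.length - i

def literalize_py (pattern : String) : String :=
  String.ofList (literalizeLoop pattern.toList 0 [])

-- ===== PORT B =====
-- s.translate(table deleting the metacharacters): exact = drop exactly those chars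
def pvStrip (s : List Char) : List Char := s.filter (fun c => !pvMeta c)

-- hand port of pattern.split("\\"): exact for a 1-char separator
def pvSplit (cs : List Char) : List (List Char) :=
  match cs with
  | [] => [[]]
  | c :: rest =>
    if c = '\\' then [] :: pvSplit rest
    else
      match pvSplit rest with
      | [] => [[c]]      -- unreachable: pvSplit never returns []
      | h :: t => (c :: h) :: t

-- the for-loop of B over chunks[1:], state (res, plain)
def literalizeGo (ts : List (List Char)) (plain : Bool) (res : List Char) : List Char :=
  match ts with
  | [] => res
  | t :: rest =>
    if plain then literalizeGo rest false (res ++ pvStrip t)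
    else
      match t with
      | [] => literalizeGo rest true (res ++ ['\\'])
      | c :: r => literalizeGo rest false (res ++ c :: pvStrip r)

def literalize_py_alt (pattern : String) : String :=
  match pvSplit pattern.toList with
  | [] => ""               -- unreachable: split never returns an empty list
  | t0 :: rest => String.ofList (literalizeGo rest false (pvStrip t0))

-- ===== PRECONDITION & SPEC =====
def Spec_literalize_py (pattern : String) (out : String) : Prop := out = literalize_py_alt pattern
instance (pattern : String) (out : String) : Decidable (Spec_literalize_py pattern out) := by unfold Spec_literalize_py; infer_instance

-- ===== CLAIM (what is proved, stated in full; the proofs are below) =====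
def Claim_equal_literalize_py : Prop := ∀ (pattern : String), Dom_literalize_py pattern → Spec_literalize_py pattern (literalize_py pattern)

-- ===== LEMMAS AND PROOFS =====

-- reference recursion: what A's scan computes, structurally
mutual
def fSpec : List Char → List Char
  | [] => []
  | c :: r => if c = '\\' then fEsc r else if pvMeta c then fSpec r else c :: fSpec r

def fEsc : List Char → List Char
  | [] => ['\\']
  | d :: r => d :: fSpec r
end

lemma literalizeLoop_eq (cs : List Char) (i : Nat) (out : List Char) :
    literalizeLoop cs i out = out ++ fSpec (cs.drop i) := by
  fun_induction literalizeLoop cs i out with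
  | case1 i out h ch hesc ih =>
      have hb : cs[i] = '\\' := hesc.1
      rw [ih, List.drop_eq_getElem_cons h, List.drop_eq_getElem_cons hesc.2]
      simp [fSpec, fEsc, hb]
  | case2 i out h ch hesc hm ih =>
      have hm' : pvMeta cs[i] = true := hm
      have hb : ¬ cs[i] = '\\' := by
        intro hb; rw [hb] at hm'; exact absurd hm' (by decide)
      rw [ih, List.drop_eq_getElem_cons h]
      simp [fSpec, hb, hm']
  | case3 i out h ch hesc hm ih =>
      have hm' : pvMeta cs[i] = false := by simpa using hm
      by_cases hb : cs[i] = '\\'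
      · have h2 : ¬ i + 1 < cs.length := fun hlt => hesc ⟨hb, hlt⟩
        have hd : cs.drop (i + 1) = [] := by rw [List.drop_eq_nil_iff]; omega
        rw [ih, List.drop_eq_getElem_cons h]
        simp [fSpec, fEsc, hb, hd]
        exact hb
      · rw [ih, List.drop_eq_getElem_cons h]
        simp [fSpec, hb, hm']
        rfl
  | case4 i out h =>
      have hd : cs.drop i = [] := by rw [List.drop_eq_nil_iff]; omega
      simp [hd, fSpec]

lemma pvSplit_ne_nil (cs : List Char) : pvSplit cs ≠ [] := by
  match cs with
  | [] => simp [pvSplit]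
  | c :: rest =>
    rw [pvSplit]
    split
    · simp
    · split <;> simp

lemma literalizeGo_append (ts : List (List Char)) (plain : Bool) (res : List Char) :
    literalizeGo ts plain res = res ++ literalizeGo ts plain [] := by
  induction ts generalizing plain res with
  | nil => simp [literalizeGo]
  | cons t rest ih =>
    cases plain with
    | true =>
      show literalizeGo rest false (res ++ pvStrip t) =
        res ++ literalizeGo rest false ([] ++ pvStrip t)
      rw [ih, ih false ([] ++ pvStrip t)]; simp
    | false =>
      cases t with
      | nil =>
        show literalizeGo rest true (res ++ ['\\']) =
          res ++ literalizeGo rest true ([] ++ ['\\'])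
        rw [ih, ih true ([] ++ ['\\'])]; simp
      | cons c r =>
        show literalizeGo rest false (res ++ c :: pvStrip r) =
          res ++ literalizeGo rest false ([] ++ c :: pvStrip r)
        rw [ih, ih false ([] ++ c :: pvStrip r)]; simp

lemma main_split (cs : List Char) :
    literalizeGo (pvSplit cs) true [] = fSpec cs ∧
    literalizeGo (pvSplit cs) false [] = fEsc cs := by
  induction cs with
  | nil => exact ⟨rfl, rfl⟩
  | cons c r ih =>
    by_cases hb : c = '\\'
    · subst hb
      rw [pvSplit, if_pos rfl]
      constructor
      · show literalizeGo (pvSplit r) false ([] ++ pvStrip []) = fSpec ('\\' :: r)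
        simpa [fSpec, pvStrip] using ih.2
      · show literalizeGo (pvSplit r) true ['\\'] = fEsc ('\\' :: r)
        rw [show (['\\'] : List Char) = [] ++ ['\\'] from rfl, literalizeGo_append, ih.1]
        rfl
    · obtain ⟨h, t, hsp⟩ := List.exists_cons_of_ne_nil (pvSplit_ne_nil r)
      have hgo : pvStrip h ++ literalizeGo t false [] = fSpec r := by
        have h1 := ih.1
        rw [hsp, show literalizeGo (h :: t) true [] =
          literalizeGo t false ([] ++ pvStrip h) from rfl, literalizeGo_append] at h1
        simpa using h1
      rw [pvSplit, if_neg hb, hsp]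
      constructor
      · show literalizeGo t false ([] ++ pvStrip (c :: h)) = fSpec (c :: r)
        rw [literalizeGo_append]
        have hs : pvStrip (c :: h) = (if pvMeta c then [] else [c]) ++ pvStrip h := by
          rcases hpm : pvMeta c <;> simp [pvStrip, hpm]
        rw [hs, fSpec, if_neg hb]
        rcases pvMeta c <;> simp [hgo]
      · show literalizeGo t false ([] ++ c :: pvStrip h) = fEsc (c :: r)
        rw [literalizeGo_append]
        simp only [List.nil_append, List.cons_append, hgo]
        rfl

-- ===== VERDICT (by name: the statement is the Claim_ definition above) =====
theorem literalize_py_spec : Claim_equal_literalize_py := by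
  intro pattern _
  show literalize_py pattern = literalize_py_alt pattern
  unfold literalize_py literalize_py_alt
  rw [literalizeLoop_eq, List.drop_zero, List.nil_append]
  obtain ⟨t0, rest, hsp⟩ := List.exists_cons_of_ne_nil (pvSplit_ne_nil pattern.toList)
  rw [hsp]
  have h2 := (main_split pattern.toList).1
  rw [hsp, show literalizeGo (t0 :: rest) true [] =
    literalizeGo rest false ([] ++ pvStrip t0) from rfl, List.nil_append] at h2
  rw [← h2]
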